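-- pv_equiv track=rewrite | github.com/paliwodam/Algorithms-and-Data-Structures | Exams/test_2019_term_1/ex1.py | count_single_multi
-- ===== SOURCE A (Python) =====
-- def count_single_multi(i):
--     single = 0
--     multi = 10
--
--     digits = [0] * 10
--     while i > 0:
--         k = i % 10
--         digits[k-1] += 1
--         i //= 10
--
--     for j in digits:
--         if j == 1:
--             single += 1
--         if j > 1:
--             multi -= 1
--
--     return single, multi
-- ===== SOURCE B (Python) =====
-- def count_single_multi(i):
--     seen_once = set()
--     seen_multi = set()
--     while i > 0:
--         k = i % 10
--         if k in seen_multi: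
--             pass
--         elif k in seen_once:
--             seen_once.discard(k)
--             seen_multi.add(k)
--         else:
--             seen_once.add(k)
--         i //= 10
--     return len(seen_once), 10 - len(seen_multi)
-- ===== Notes on version B (the rewrite author's own statement) =====
-- stated objective: alternative
-- what changed: Replaced A's per-digit frequency array filled in one loop and classified by a second loop with a single digit-extraction pass that maintains two sets (digits seen exactly once / seen more than once) and returns their sizes.
import Mathlib
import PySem

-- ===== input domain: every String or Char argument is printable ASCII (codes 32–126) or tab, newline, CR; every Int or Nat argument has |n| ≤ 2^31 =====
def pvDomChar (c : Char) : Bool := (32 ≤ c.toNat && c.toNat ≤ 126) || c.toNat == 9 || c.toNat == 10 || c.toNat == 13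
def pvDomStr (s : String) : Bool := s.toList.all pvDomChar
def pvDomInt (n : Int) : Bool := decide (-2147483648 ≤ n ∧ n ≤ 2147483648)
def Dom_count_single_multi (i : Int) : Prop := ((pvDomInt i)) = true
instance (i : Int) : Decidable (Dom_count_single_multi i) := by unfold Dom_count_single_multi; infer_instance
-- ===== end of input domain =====

-- B replaces A's frequency array plus second classification pass by a single digit-extraction
-- pass over two sets (digits seen exactly once / seen more than once); same return value.

-- ===== PORT A =====
-- while i > 0: k = i % 10; digits[k-1] += 1; i //= 10   (k-1 = -1 wraps to the last slot, Python negative indexing)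
def pvALoop (fuel : Nat) (i : Int) (digits : List Int) : List Int :=
  match fuel with
  | 0 => digits
  | fuel + 1 =>
    if 0 < i then
      let k := PySem.Int.mod i 10
      pvALoop fuel (PySem.Int.floordiv i 10)
        (PySem.List.pySetD digits (k - 1) (PySem.List.pyGetD digits (k - 1) 0 + 1))
    else digits

-- digits = [0]*10, then the classification pass 'for j in digits'
def count_single_multi (i : Int) : Int × Int :=
  let digits := pvALoop i.toNat i (List.replicate 10 0)
  digits.foldl (fun sm j =>
    let s' := if j = 1 then sm.1 + 1 else sm.1
    let m' := if 1 < j then sm.2 - 1 else sm.2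
    (s', m')) ((0 : Int), (10 : Int))

-- ===== PORT B =====
def pvBLoop (fuel : Nat) (i : Int) (once multi : PySem.Set Int) : PySem.Set Int × PySem.Set Int :=
  match fuel with
  | 0 => (once, multi)
  | fuel + 1 =>
    if 0 < i then
      let k := PySem.Int.mod i 10
      if PySem.Set.contains multi k then
        pvBLoop fuel (PySem.Int.floordiv i 10) once multi
      else if PySem.Set.contains once k then
        pvBLoop fuel (PySem.Int.floordiv i 10) (PySem.Set.discard once k) (PySem.Set.add multi k)
      else
        pvBLoop fuel (PySem.Int.floordiv i 10) (PySem.Set.add once k) multi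
    else (once, multi)

def count_single_multi_alt (i : Int) : Int × Int :=
  let om := pvBLoop i.toNat i PySem.Set.empty PySem.Set.empty
  ((om.1.length : Int), 10 - (om.2.length : Int))

-- ===== PRECONDITION & SPEC =====
def Spec_count_single_multi (i : Int) (out : Int × Int) : Prop := out = count_single_multi_alt i
instance (i : Int) (out : Int × Int) : Decidable (Spec_count_single_multi i out) := by unfold Spec_count_single_multi; infer_instance

-- ===== CLAIM (what is proved, stated in full; the proofs are below) =====
def Claim_equal_count_single_multi : Prop := ∀ (i : Int), Dom_count_single_multi i → Spec_count_single_multi i (count_single_multi i)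

-- ===== LEMMAS AND PROOFS =====
-- A's counter array slots digit d at index (d-1) mod 10; slotOf names that slot.
def slotOf (k : Int) : Nat := if k = 0 then 9 else (k - 1).toNat

lemma slot_lt (k : Int) (h1 : k < 10) : slotOf k < 10 := by unfold slotOf; split <;> omega

lemma slot_inj (k d : Int) (hk0 : 0 ≤ k) (hk1 : k < 10) (hd0 : 0 ≤ d) (hd1 : d < 10)
    (h : k ≠ d) : slotOf k ≠ slotOf d := by simp only [slotOf]; split_ifs <;> omega

lemma pyGet_slot (digits : List Int) (h : digits.length = 10) (k : Int)
    (h0 : 0 ≤ k) (h1 : k < 10) :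
    PySem.List.pyGetD digits (k - 1) 0 = digits.getD (slotOf k) 0 := by
  rcases eq_or_lt_of_le h0 with he | hp
  · subst_vars
    simp [PySem.List.pyGetD, PySem.List.pyGet?, PySem.List.pyIdx?, h, slotOf,
      List.getD_eq_getElem?_getD]
  · rw [PySem.List.pyGetD_eq_getElem _ _ (by omega) (by omega)]
    rw [List.getD_eq_getElem _ _ (by rw [h]; exact slot_lt k h1)]
    congr 1
    unfold slotOf; split <;> omega

lemma pySet_slot (digits : List Int) (h : digits.length = 10) (k v : Int)
    (h0 : 0 ≤ k) (h1 : k < 10) :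
    PySem.List.pySetD digits (k - 1) v = digits.set (slotOf k) v := by
  rcases eq_or_lt_of_le h0 with he | hp
  · subst_vars
    simp [PySem.List.pySetD, PySem.List.pySet?, PySem.List.pyIdx?, h, slotOf]
  · rw [PySem.List.pySetD_of_nonneg _ _ (by omega)]
    congr 1
    unfold slotOf; split <;> omega

lemma getD_set (digits : List Int) (n m : Nat)
    (hm : m < digits.length) (v : Int) :
    (digits.set n v).getD m 0 = if m = n then v else digits.getD m 0 := by
  rw [List.getD_eq_getElem _ _ (by simpa using hm), List.getElem_set]
  split
  next hcase => rw [if_pos hcase.symm]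
  next hcase => rw [if_neg (Ne.symm hcase), List.getD_eq_getElem _ _ hm]

def pvInv (digits once multi : List Int) : Prop :=
  digits.length = 10 ∧ once.Nodup ∧ multi.Nodup ∧
  (∀ x ∈ once, 0 ≤ x ∧ x < 10) ∧ (∀ x ∈ multi, 0 ≤ x ∧ x < 10) ∧
  (∀ k : Int, 0 ≤ k → k < 10 →
     0 ≤ digits.getD (slotOf k) 0 ∧
     (digits.getD (slotOf k) 0 = 1 ↔ k ∈ once) ∧
     (1 < digits.getD (slotOf k) 0 ↔ k ∈ multi))

lemma pvInv_step (digits once multi : List Int) (k : Int)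
    (hI : pvInv digits once multi) (h0 : 0 ≤ k) (h1 : k < 10) :
    pvInv (digits.set (slotOf k) (digits.getD (slotOf k) 0 + 1))
      (if k ∈ multi then once else if k ∈ once then PySem.Set.discard once k
        else PySem.Set.add once k)
      (if k ∈ multi then multi else if k ∈ once then PySem.Set.add multi k else multi) := by
  obtain ⟨hlen, hno, hnm, hbo, hbm, hiff⟩ := hI
  have hslot := slot_lt k h1
  have hgd : ∀ d : Int, 0 ≤ d → d < 10 →
      (digits.set (slotOf k) (digits.getD (slotOf k) 0 + 1)).getD (slotOf d) 0 =
      if d = k then digits.getD (slotOf k) 0 + 1 else digits.getD (slotOf d) 0 := by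
    intro d hd0 hd1
    rw [getD_set _ _ _ (by rw [hlen]; exact slot_lt d hd1)]
    by_cases hdk : d = k
    · rw [if_pos hdk, if_pos (by rw [hdk])]
    · rw [if_neg hdk, if_neg (slot_inj d k hd0 hd1 h0 h1 hdk)]
  refine ⟨by simp [hlen], ?_, ?_, ?_, ?_, ?_⟩
  · split_ifs <;> [exact hno; exact PySem.Set.nodup_discard _ _ hno; exact PySem.Set.nodup_add _ _ hno]
  · split_ifs <;> [exact hnm; exact PySem.Set.nodup_add _ _ hnm; exact hnm]
  · split_ifs <;> intro x hx
    · exact hbo x hx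
    · exact hbo x ((PySem.Set.mem_discard _ _ _).1 hx).1
    · rcases (PySem.Set.mem_add _ _ _).1 hx with h | h
      · exact hbo x h
      · exact h ▸ ⟨h0, h1⟩
  · split_ifs <;> intro x hx
    · exact hbm x hx
    · rcases (PySem.Set.mem_add _ _ _).1 hx with h | h
      · exact hbm x h
      · exact h ▸ ⟨h0, h1⟩
    · exact hbm x hx
  · intro d hd0 hd1
    rw [hgd d hd0 hd1]
    obtain ⟨hk_nn, hk1, hk2⟩ := hiff k h0 h1
    obtain ⟨hd_nn, hd1', hd2'⟩ := hiff d hd0 hd1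
    by_cases hdk : d = k
    · subst hdk
      rw [if_pos rfl]
      by_cases hm : d ∈ multi
      · simp only [if_pos hm]
        have hg2 : 1 < digits.getD (slotOf d) 0 := hd2'.2 hm
        refine ⟨by omega, ?_, ?_⟩
        · constructor
          · intro h; exact absurd h (by omega)
          · intro h; have := hd1'.2 h; omega
        · exact ⟨fun _ => hm, fun _ => by omega⟩
      · by_cases ho : d ∈ once
        · simp only [if_neg hm, if_pos ho]
          have e1 : digits.getD (slotOf d) 0 = 1 := hd1'.2 ho
          refine ⟨by omega, ?_, ?_⟩
          · constructor
            · intro h; exact absurd h (by omega)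
            · intro h; exact absurd rfl ((PySem.Set.mem_discard _ _ _).1 h).2
          · exact ⟨fun _ => (PySem.Set.mem_add _ _ _).2 (Or.inr rfl), fun _ => by omega⟩
        · simp only [if_neg hm, if_neg ho]
          have h1' : digits.getD (slotOf d) 0 ≠ 1 := fun h => ho (hd1'.1 h)
          have h2' : ¬ 1 < digits.getD (slotOf d) 0 := fun h => hm (hd2'.1 h)
          refine ⟨by omega, ?_, ?_⟩
          · exact ⟨fun _ => (PySem.Set.mem_add _ _ _).2 (Or.inr rfl), fun _ => by omega⟩
          · constructor
            · intro h; exact absurd h (by omega)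
            · intro h; exact absurd h hm
    · rw [if_neg hdk]
      refine ⟨hd_nn, ?_, ?_⟩ <;> split_ifs with hm ho
      · exact hd1'
      · rw [hd1']; simp [PySem.Set.mem_discard]; intro; omega
      · rw [hd1']; simp [PySem.Set.mem_add, hdk]
      · exact hd2'
      · rw [hd2']; simp [PySem.Set.mem_add, hdk]
      · exact hd2'

lemma pvInv_init : pvInv (List.replicate 10 0) [] [] := by
  refine ⟨by simp, List.nodup_nil, List.nodup_nil, by simp, by simp, ?_⟩
  intro k h0 h1
  have hs : slotOf k < 10 := slot_lt k h1
  rw [List.getD_eq_getElem _ _ (by simpa using hs), List.getElem_replicate]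
  norm_num

lemma foldGen (l : List Int) : ∀ s m : Int,
    l.foldl (fun sm j =>
      let s' := if j = 1 then sm.1 + 1 else sm.1
      let m' := if 1 < j then sm.2 - 1 else sm.2
      (s', m')) (s, m)
    = (s + l.countP (fun j => decide (j = 1)), m - l.countP (fun j => decide (1 < j))) := by
  induction l with
  | nil => simp
  | cons a t ih =>
    intro s m
    simp only [List.foldl_cons, ih, List.countP_cons]
    refine Prod.ext ?_ ?_ <;> simp <;> split_ifs <;> omega

lemma len10_cases (l : List Int) (h : l.length = 10) :
    l = [l.getD 0 0, l.getD 1 0, l.getD 2 0, l.getD 3 0, l.getD 4 0,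
         l.getD 5 0, l.getD 6 0, l.getD 7 0, l.getD 8 0, l.getD 9 0] := by
  rcases l with _ | ⟨a0, _ | ⟨a1, _ | ⟨a2, _ | ⟨a3, _ | ⟨a4, _ | ⟨a5, _ | ⟨a6, _ | ⟨a7, _ | ⟨a8, _ | ⟨a9, _ | ⟨a10, t⟩⟩⟩⟩⟩⟩⟩⟩⟩⟩⟩ <;> simp_all

lemma mapSlot (digits : List Int) :
    ([0, 1, 2, 3, 4, 5, 6, 7, 8, 9] : List Int).map (fun d => digits.getD (slotOf d) 0)
    = [digits.getD 9 0, digits.getD 0 0, digits.getD 1 0, digits.getD 2 0, digits.getD 3 0,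
       digits.getD 4 0, digits.getD 5 0, digits.getD 6 0, digits.getD 7 0, digits.getD 8 0] := by
  norm_num [slotOf]
  refine ⟨?_, ?_, ?_, ?_, ?_, ?_, ?_, ?_⟩ <;> rfl

lemma setLen (digits s : List Int) (hs : s.Nodup)
    (hb : ∀ x ∈ s, 0 ≤ x ∧ x < 10) (p : Int → Bool)
    (hmem : ∀ x : Int, 0 ≤ x → x < 10 → (p (digits.getD (slotOf x) 0) = true ↔ x ∈ s)) :
    s.length = List.countP p
      [digits.getD 9 0, digits.getD 0 0, digits.getD 1 0, digits.getD 2 0, digits.getD 3 0,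
       digits.getD 4 0, digits.getD 5 0, digits.getD 6 0, digits.getD 7 0, digits.getD 8 0] := by
  have hfil : s.Perm (([0, 1, 2, 3, 4, 5, 6, 7, 8, 9] : List Int).filter
      (fun d => p (digits.getD (slotOf d) 0))) := by
    refine (List.perm_ext_iff_of_nodup hs (List.Nodup.filter _ (by decide))).2 ?_
    intro x
    rw [List.mem_filter]
    constructor
    · intro hx
      obtain ⟨h0, h1⟩ := hb x hx
      exact ⟨by simp; omega, (hmem x h0 h1).2 hx⟩
    · rintro ⟨hxl, hpx⟩
      have hx01 : 0 ≤ x ∧ x < 10 := by simp at hxl; omega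
      exact (hmem x hx01.1 hx01.2).1 hpx
  rw [hfil.length_eq, ← List.countP_eq_length_filter]
  rw [show (List.countP (fun d => p (List.getD digits (slotOf d) 0)) [0,1,2,3,4,5,6,7,8,9] : Nat)
      = List.countP p (([0,1,2,3,4,5,6,7,8,9] : List Int).map (fun d => digits.getD (slotOf d) 0))
    from (List.countP_map).symm]
  rw [mapSlot]

lemma pvFinal (digits once multi : List Int) (hI : pvInv digits once multi) :
    digits.foldl (fun sm j =>
      let s' := if j = 1 then sm.1 + 1 else sm.1
      let m' := if 1 < j then sm.2 - 1 else sm.2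
      (s', m')) ((0 : Int), (10 : Int))
    = ((once.length : Int), 10 - (multi.length : Int)) := by
  obtain ⟨hlen, hno, hnm, hbo, hbm, hiff⟩ := hI
  rw [foldGen]
  have hrot : List.Perm
      [digits.getD 9 0, digits.getD 0 0, digits.getD 1 0, digits.getD 2 0, digits.getD 3 0,
       digits.getD 4 0, digits.getD 5 0, digits.getD 6 0, digits.getD 7 0, digits.getD 8 0]
      digits := by
    conv_rhs => rw [len10_cases digits hlen]
    exact List.perm_append_comm (l₁ := [digits.getD 9 0])
      (l₂ := [digits.getD 0 0, digits.getD 1 0, digits.getD 2 0, digits.getD 3 0,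
        digits.getD 4 0, digits.getD 5 0, digits.getD 6 0, digits.getD 7 0, digits.getD 8 0])
  have h1 : once.length = List.countP (fun j => decide (j = 1)) digits := by
    rw [setLen digits once hno hbo (fun j => decide (j = 1)) (fun x h0 h1 => by
      rw [decide_eq_true_iff]; exact (hiff x h0 h1).2.1)]
    exact hrot.countP_eq _
  have h2 : multi.length = List.countP (fun j => decide (1 < j)) digits := by
    rw [setLen digits multi hnm hbm (fun j => decide (1 < j)) (fun x h0 h1 => by
      rw [decide_eq_true_iff]; exact (hiff x h0 h1).2.2)]
    exact hrot.countP_eq _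
  rw [h1, h2]
  simp

lemma pvInv_loop (n : Nat) : ∀ (i : Int), i.toNat ≤ n → ∀ digits once multi,
    pvInv digits once multi →
    pvInv (pvALoop n i digits) (pvBLoop n i once multi).1 (pvBLoop n i once multi).2 := by
  induction n with
  | zero =>
    intro i hi digits once multi hI
    exact hI
  | succ n IH =>
    intro i hi digits once multi hI
    simp only [pvALoop, pvBLoop]
    by_cases hpos : 0 < i
    · simp only [if_pos hpos]
      have hk0 : 0 ≤ PySem.Int.mod i 10 := PySem.Int.mod_nonneg i (by norm_num)
      have hk1 : PySem.Int.mod i 10 < 10 := PySem.Int.mod_lt i (by norm_num)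
      have hlen : digits.length = 10 := hI.1
      rw [pySet_slot digits hlen _ _ hk0 hk1, pyGet_slot digits hlen _ hk0 hk1]
      have hrec : (PySem.Int.floordiv i 10).toNat ≤ n := by
        rw [PySem.Int.floordiv_eq_ediv_of_pos (by omega)]
        omega
      have hstep := pvInv_step digits once multi (PySem.Int.mod i 10) hI hk0 hk1
      by_cases hm : PySem.Int.mod i 10 ∈ multi
      · rw [if_pos ((PySem.Set.contains_iff _ _).2 hm)]
        simp only [if_pos hm] at hstep
        exact IH _ hrec _ _ _ hstep
      · rw [if_neg (fun h => hm ((PySem.Set.contains_iff _ _).1 h))]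
        by_cases ho : PySem.Int.mod i 10 ∈ once
        · rw [if_pos ((PySem.Set.contains_iff _ _).2 ho)]
          simp only [if_neg hm, if_pos ho] at hstep
          exact IH _ hrec _ _ _ hstep
        · rw [if_neg (fun h => ho ((PySem.Set.contains_iff _ _).1 h))]
          simp only [if_neg hm, if_neg ho] at hstep
          exact IH _ hrec _ _ _ hstep
    · simp only [if_neg hpos]
      exact hI

-- ===== VERDICT (by name: the statement is the Claim_ definition above) =====
theorem count_single_multi_spec : Claim_equal_count_single_multi := by
  intro i _
  unfold Spec_count_single_multi count_single_multi count_single_multi_alt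
  have h := pvInv_loop i.toNat i le_rfl (List.replicate 10 0) [] [] pvInv_init
  exact pvFinal _ _ _ h
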